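-- pv_equiv track=rewrite | github.com/GeorgeFejer91/BreathingSpace | main.py | _check_sequence_balance
-- ===== SOURCE A (Python) =====
-- from typing import Dict, List, Tuple, Optional
--
-- def _check_sequence_balance(sequence: List[str], max_consecutive: int = 3) -> bool:
--     """Check if sequence has balanced trial types with no long runs."""
--     if not sequence:
--         return True
--
--     current_run = 1
--     current_type = sequence[0]
--
--     for trial_type in sequence[1:]:
--         if trial_type == current_type:
--             current_run += 1
--             if current_run > max_consecutive:
--                 return False
--         else:
--             current_run = 1
--             current_type = trial_type
--
--     return True
-- ===== SOURCE B (Python) =====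
-- def _check_sequence_balance(sequence, max_consecutive=3):
--     """Check if sequence has balanced trial types with no long runs."""
--     k = max_consecutive
--     if k >= len(sequence):
--         return True  # no window of k+1 trials fits
--     return all(sequence[i + 1 : i + k + 1] != [x] * k
--                for i, x in enumerate(sequence))
-- ===== Notes on version B (the rewrite author's own statement) =====
-- stated objective: alternative
-- what changed: B replaces A's stateful incremental run counter with a stateless per-position window test: for each index i it compares the slice of the next max_consecutive elements against a replicated copy of sequence[i], so an over-long run exists exactly when some such window is constant.
-- outside the precondition, e.g. on _check_sequence_balance(['a', 'b'], 0): A returns True, B returns False; on _check_sequence_balance(['a'], 0): A returns True, B returns False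
import Mathlib
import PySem

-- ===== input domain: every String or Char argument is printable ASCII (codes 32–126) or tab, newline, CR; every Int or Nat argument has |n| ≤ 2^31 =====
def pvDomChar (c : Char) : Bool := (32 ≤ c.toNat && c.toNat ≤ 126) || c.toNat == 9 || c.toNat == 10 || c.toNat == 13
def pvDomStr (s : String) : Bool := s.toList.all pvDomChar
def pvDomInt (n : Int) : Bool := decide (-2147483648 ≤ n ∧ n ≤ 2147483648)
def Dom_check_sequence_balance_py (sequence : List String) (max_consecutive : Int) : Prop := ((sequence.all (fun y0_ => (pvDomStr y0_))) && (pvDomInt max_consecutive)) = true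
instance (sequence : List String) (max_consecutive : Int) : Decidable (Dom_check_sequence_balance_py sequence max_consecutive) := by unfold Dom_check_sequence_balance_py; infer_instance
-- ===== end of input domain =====

-- B replaces A's stateful run counter by a stateless per-position window test
-- (slice vs replicated element); same return value on Pre_; no side effects.

-- ===== PORT A =====
-- A's for-loop over sequence[1:] carrying (current_run, current_type); 'return False' = stop with false.
def pvALoop (m : Int) : List String → Int → String → Bool
  | [], _, _ => true
  | t :: rest, run, cur =>
    if t == cur then
      if run + 1 > m then false else pvALoop m rest (run + 1) cur
    else
      pvALoop m rest 1 t

def check_sequence_balance_py (sequence : List String) (max_consecutive : Int) : Bool :=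
  match sequence with
  | [] => true
  | h :: t => pvALoop max_consecutive t 1 h

-- ===== PORT B =====
-- if k >= len(sequence): True (no window of k+1 trials fits);
-- else all(sequence[i+1 : i+k+1] != [x]*k for i, x in enumerate(sequence))
def check_sequence_balance_py_alt (sequence : List String) (max_consecutive : Int) : Bool :=
  if (sequence.length : Int) ≤ max_consecutive then true
  else (PySem.List.enumerate sequence 0).all fun ix =>
    !(PySem.List.slice sequence (some (ix.1 + 1)) (some (ix.1 + max_consecutive + 1))
        == List.replicate max_consecutive.toNat ix.2)

-- ===== PRECONDITION & SPEC =====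
-- Pre_ excludes non-positive max_consecutive on nonempty sequences: a degenerate limit no
-- caller would specify, on which A (whose counter never checks a run of length 1) may accept
-- a sequence that B's uniform window test rejects — both answers are defensible there.
def Pre_check_sequence_balance_py (sequence : List String) (max_consecutive : Int) : Prop :=
  sequence = [] ∨ 1 ≤ max_consecutive
instance (sequence : List String) (max_consecutive : Int) : Decidable (Pre_check_sequence_balance_py sequence max_consecutive) := by unfold Pre_check_sequence_balance_py; infer_instance

def pvWitness_check_sequence_balance_py : List String × Int := (["a", "a", "b"], 2)

def Spec_check_sequence_balance_py (sequence : List String) (max_consecutive : Int) (out : Bool) : Prop := out = check_sequence_balance_py_alt sequence max_consecutive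
instance (sequence : List String) (max_consecutive : Int) (out : Bool) : Decidable (Spec_check_sequence_balance_py sequence max_consecutive out) := by unfold Spec_check_sequence_balance_py; infer_instance

-- ===== CLAIM (what is proved, stated in full; the proofs are below) =====
def Claim_equal_check_sequence_balance_py : Prop := ∀ (sequence : List String) (max_consecutive : Int), Dom_check_sequence_balance_py sequence max_consecutive → Pre_check_sequence_balance_py sequence max_consecutive → Spec_check_sequence_balance_py sequence max_consecutive (check_sequence_balance_py sequence max_consecutive)

-- ===== LEMMAS AND PROOFS =====

-- proof-only reformulation of B: per-position check by structural recursion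
def pvW (m : Int) : List String → Bool
  | [] => true
  | x :: xs => (decide ¬(xs.take m.toNat = List.replicate m.toNat x)) && pvW m xs

theorem pv_not_beq (a b : List String) : (!(a == b)) = decide (¬ a = b) := by
  by_cases h : a = b <;> simp [h]

-- B's enumerate/slice pass equals pvW, generalized over the start offset.
theorem pvAlt_eq_pvW (m : Int) (hm : 1 ≤ m) :
    ∀ (xs full : List String) (s : Nat), full.drop s = xs →
    ((PySem.List.enumerate xs (s : Int)).all fun ix =>
      !(PySem.List.slice full (some (ix.1 + 1)) (some (ix.1 + m + 1))
          == List.replicate m.toNat ix.2)) = pvW m xs := by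
  intro xs
  induction xs with
  | nil => intro full s _; simp [PySem.List.enumerate_nil, pvW]
  | cons x xs ih =>
    intro full s hdrop
    rw [PySem.List.enumerate_cons, List.all_cons]
    have hslice : PySem.List.slice full (some ((s : Int) + 1)) (some ((s : Int) + m + 1))
        = xs.take m.toNat := by
      rw [PySem.List.slice_toNat full (a := (s : Int) + 1) (b := (s : Int) + m + 1)
        (by omega) (by omega)]
      have h1 : ((s : Int) + 1).toNat = s + 1 := by omega
      have h2 : ((s : Int) + m + 1).toNat - (s + 1) = m.toNat := by omega
      rw [h1, h2]
      have hd1 : full.drop (s + 1) = xs := by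
        rw [← List.tail_drop, hdrop]; rfl
      rw [hd1]
    have htail : ((s : Int) + 1) = ((s + 1 : Nat) : Int) := by push_cast; ring
    have hd1 : full.drop (s + 1) = xs := by
      rw [← List.tail_drop, hdrop]; rfl
    rw [show pvW m (x :: xs)
          = ((decide ¬(xs.take m.toNat = List.replicate m.toNat x)) && pvW m xs) from rfl]
    rw [hslice, htail, ih full (s + 1) hd1, pv_not_beq]

theorem pv_take_rep_mono (xs : List String) (c : String) (a b : Nat) (hba : b ≤ a)
    (h : xs.take a = List.replicate a c) : xs.take b = List.replicate b c := by
  have := congrArg (List.take b) h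
  rwa [List.take_take, Nat.min_eq_left hba, List.take_replicate, Nat.min_eq_left hba] at this

-- A's loop from state (run, cur): the current run may extend by at most m - run more
-- copies of cur, and every window strictly inside the remainder must be non-constant.
theorem pvALoop_eq (m : Int) (hm : 1 ≤ m) : ∀ (xs : List String) (run : Int) (cur : String),
    1 ≤ run → run ≤ m →
    pvALoop m xs run cur =
      ((decide ¬(xs.take (m - run + 1).toNat = List.replicate (m - run + 1).toNat cur))
        && pvW m xs) := by
  intro xs
  induction xs with
  | nil =>
    intro run cur h1 h2
    have e : (m - run + 1).toNat = (m - run).toNat + 1 := by omega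
    simp [pvALoop, pvW, e, List.replicate_succ]
  | cons y ys ih =>
    intro run cur h1 h2
    by_cases hy : (y == cur) = true
    · have hyc : y = cur := by simpa using hy
      subst hyc
      by_cases hr : run + 1 > m
      · have e1 : (m - run + 1).toNat = 1 := by omega
        simp [pvALoop, hr, e1]
      · have hrec : pvALoop m (y :: ys) run y = pvALoop m ys (run + 1) y := by
          simp [pvALoop, hr]
        rw [hrec, ih (run + 1) y (by omega) (by omega)]
        have e2 : (m - run + 1).toNat = (m - (run + 1) + 1).toNat + 1 := by omega
        have efront : ((y :: ys).take (m - run + 1).toNat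
            = List.replicate (m - run + 1).toNat y)
            ↔ (ys.take (m - (run + 1) + 1).toNat
                = List.replicate (m - (run + 1) + 1).toNat y) := by
          simp [e2, List.replicate_succ]
        rw [show pvW m (y :: ys)
              = ((decide ¬(ys.take m.toNat = List.replicate m.toNat y)) && pvW m ys) from rfl]
        by_cases hF : ys.take (m - (run + 1) + 1).toNat
            = List.replicate (m - (run + 1) + 1).toNat y
        · simp [efront, hF]
        · have hfw : ¬ (ys.take m.toNat = List.replicate m.toNat y) := fun hfull =>
            hF (pv_take_rep_mono ys y m.toNat ((m - (run + 1) + 1).toNat) (by omega) hfull)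
          simp [efront, hF, hfw]
    · have hne : y ≠ cur := by simpa using hy
      have hrec : pvALoop m (y :: ys) run cur = pvALoop m ys 1 y := by
        simp [pvALoop, hy]
      have hpos : (m - run + 1).toNat = (m - run).toNat + 1 := by omega
      have efront : ¬ ((y :: ys).take (m - run + 1).toNat
          = List.replicate (m - run + 1).toNat cur) := by
        simp [hpos, List.replicate_succ, hne]
      have e1 : (m - 1 + 1).toNat = m.toNat := by omega
      rw [hrec, ih 1 y (by omega) hm, e1]
      rw [show pvW m (y :: ys)
            = ((decide ¬(ys.take m.toNat = List.replicate m.toNat y)) && pvW m ys) from rfl]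
      simp [efront]

-- when the whole remainder cannot push the run past m, A's loop returns true
theorem pvALoop_true (m : Int) : ∀ (xs : List String) (run : Int) (cur : String),
    1 ≤ run → run + xs.length ≤ m → pvALoop m xs run cur = true := by
  intro xs
  induction xs with
  | nil => intro run cur _ _; rfl
  | cons y ys ih =>
    intro run cur h1 h2
    simp only [List.length_cons] at h2
    by_cases hy : (y == cur) = true
    · have hr : ¬ (run + 1 > m) := by push_cast at h2; omega
      simp only [pvALoop, hy, if_true, if_neg hr]
      exact ih (run + 1) cur (by omega) (by push_cast at h2 ⊢; omega)
    · simp only [pvALoop]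
      rw [if_neg hy]
      exact ih 1 y le_rfl (by push_cast at h2 ⊢; omega)

-- ===== VERDICT (by name: the statement is the Claim_ definition above) =====
theorem check_sequence_balance_py_spec : Claim_equal_check_sequence_balance_py := by
  intro sequence max_consecutive _ hpre
  unfold Spec_check_sequence_balance_py
  by_cases hbig : (sequence.length : Int) ≤ max_consecutive
  · rw [show check_sequence_balance_py_alt sequence max_consecutive = true from by
      simp [check_sequence_balance_py_alt, hbig]]
    cases sequence with
    | nil => rfl
    | cons h t =>
      have : check_sequence_balance_py (h :: t) max_consecutive
          = pvALoop max_consecutive t 1 h := rfl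
      rw [this]
      exact pvALoop_true max_consecutive t 1 h le_rfl
        (by simp only [List.length_cons] at hbig; push_cast at hbig ⊢; omega)
  · have halt : check_sequence_balance_py_alt sequence max_consecutive
        = ((PySem.List.enumerate sequence ((0 : Nat) : Int)).all fun ix =>
            !(PySem.List.slice sequence (some (ix.1 + 1)) (some (ix.1 + max_consecutive + 1))
                == List.replicate max_consecutive.toNat ix.2)) := by
      simp [check_sequence_balance_py_alt, hbig]
    cases sequence with
    | nil => rw [halt]; rfl
    | cons h t =>
      have hm : 1 ≤ max_consecutive := by
        rcases hpre with h' | h'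
        · exact absurd h' (by simp)
        · exact h'
      rw [halt, pvAlt_eq_pvW max_consecutive hm (h :: t) (h :: t) 0 (by simp)]
      have e1 : (max_consecutive - 1 + 1).toNat = max_consecutive.toNat := by omega
      have ha : check_sequence_balance_py (h :: t) max_consecutive
          = pvALoop max_consecutive t 1 h := rfl
      rw [ha, pvALoop_eq max_consecutive hm t 1 h le_rfl hm, e1]
      rfl
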